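-- pv_equiv track=rewrite | github.com/Reonyo/Gemastik-Data-Mining | src/agents/editor.py | _parse_document_sections
-- ===== SOURCE A (Python) =====
-- from typing import Dict, Any
--
-- def _parse_document_sections(document: str) -> Dict[str, str]:
--     """
--     Parse the document into sections.
--
--     Args:
--         document: Complete document text
--
--     Returns:
--         Dictionary of section name to content
--     """
--     sections = {}
--     current_section = None
--     current_content = []
--
--     lines = document.split('\n')
--
--     for line in lines:
--         line = line.strip()
--         if not line:
--             continue
--
--         # Check if this is a section header
--         if line.endswith(':') and line.upper() in [
--             'EXECUTIVE SUMMARY:',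
--             'FACTS AND BACKGROUND:',
--             'LEGAL ISSUES:',
--             'ANALYSIS AND REASONING:',
--             'CONCLUSIONS AND RECOMMENDATIONS:',
--             'ADDITIONAL CONSIDERATIONS:'
--         ]:
--             # Save previous section
--             if current_section and current_content:
--                 sections[current_section] = '\n'.join(current_content).strip()
--
--             # Start new section
--             current_section = line.replace(':', '').strip()
--             current_content = []
--         else:
--             # Add content to current section
--             if current_section:
--                 current_content.append(line)
--
--     # Save final section
--     if current_section and current_content:
--         sections[current_section] = '\n'.join(current_content).strip()
--
--     # If no sections found, create a single section
--     if not sections: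
--         sections['COMPLETE DOCUMENT'] = document
--
--     return sections
-- ===== SOURCE B (Python) =====
-- from typing import Dict, Any
--
-- _HEADERS = {
--     'EXECUTIVE SUMMARY:',
--     'FACTS AND BACKGROUND:',
--     'LEGAL ISSUES:',
--     'ANALYSIS AND REASONING:',
--     'CONCLUSIONS AND RECOMMENDATIONS:',
--     'ADDITIONAL CONSIDERATIONS:',
-- }
--
--
-- def _is_header(line: str) -> bool:
--     return line.endswith(':') and line.upper() in _HEADERS
--
--
-- def _split_leading_body(lines):
--     """Split off the leading run of non-header lines (takeWhile / dropWhile)."""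
--     body = []
--     for l in lines:
--         if _is_header(l):
--             break
--         body.append(l)
--     return body, lines[len(body):]
--
--
-- def _parse_document_sections(document: str) -> Dict[str, str]:
--     lines = [l for l in (raw.strip() for raw in document.split('\n')) if l]
--     # everything before the first header line is ignored
--     rest = _split_leading_body(lines)[1]
--     sections = {}
--     while rest:
--         name = rest[0].replace(':', '').strip()
--         body, rest = _split_leading_body(rest[1:])
--         if body:
--             sections[name] = '\n'.join(body)
--     if not sections:
--         sections['COMPLETE DOCUMENT'] = document
--     return sections
-- ===== Notes on version B (the rewrite author's own statement) =====
-- stated objective: alternative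
-- what changed: Replaces A's streaming state machine (current_section/current_content accumulator mutated per line) by a two-phase decomposition: first filter the stripped non-empty lines, then repeatedly split off a header and its run of following non-header lines (takeWhile/dropWhile) and record each non-empty block at once.
import Mathlib
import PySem

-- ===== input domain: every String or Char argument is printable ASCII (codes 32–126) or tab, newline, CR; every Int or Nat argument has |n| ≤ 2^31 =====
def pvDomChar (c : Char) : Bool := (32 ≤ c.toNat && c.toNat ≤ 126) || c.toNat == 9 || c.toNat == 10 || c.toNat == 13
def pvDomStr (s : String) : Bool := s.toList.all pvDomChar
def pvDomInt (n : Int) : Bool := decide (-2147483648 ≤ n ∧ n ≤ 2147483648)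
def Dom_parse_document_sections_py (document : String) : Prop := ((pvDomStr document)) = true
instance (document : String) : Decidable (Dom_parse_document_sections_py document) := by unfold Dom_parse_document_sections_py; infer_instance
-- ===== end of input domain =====

-- B replaces A's streaming one-line-at-a-time state machine by a two-phase decomposition
-- (filter the stripped non-empty lines, then repeatedly split off a header and its block);
-- same cost, different structure (objective: alternative).

-- ===== PORT A =====
def pyA_headers : List String :=
  ["EXECUTIVE SUMMARY:", "FACTS AND BACKGROUND:", "LEGAL ISSUES:",
   "ANALYSIS AND REASONING:", "CONCLUSIONS AND RECOMMENDATIONS:", "ADDITIONAL CONSIDERATIONS:"]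

-- the body of A's loop after the 'if not line: continue' guard
def pyA_handle (st : PySem.Dict String String × Option String × List String) (line : String) :
    PySem.Dict String String × Option String × List String :=
  match st with
  | (sections, cur, cont) =>
    if PySem.Str.endswith line ":" && pyA_headers.contains (PySem.Str.upper line) then
      let sections' :=
        match cur with
        | some name =>
            if name ≠ "" ∧ cont ≠ [] then
              sections.insert name (PySem.Str.strip (PySem.Str.join "\n" cont))
            else sections
        | none => sections
      (sections', some (PySem.Str.strip (PySem.Str.replace line ":" "")), [])
    else
      match cur with
      | some name => if name ≠ "" then (sections, cur, cont ++ [line]) else (sections, cur, cont)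
      | none => (sections, cur, cont)

def pyA_step (st : PySem.Dict String String × Option String × List String) (raw : String) :
    PySem.Dict String String × Option String × List String :=
  let line := PySem.Str.strip raw
  if line = "" then st else pyA_handle st line

def parse_document_sections_py (document : String) : List (String × String) :=
  let lines := (PySem.Str.split? document "\n").getD []
  match lines.foldl pyA_step ((PySem.Dict.empty : PySem.Dict String String), none, ([] : List String)) with
  | (sections, cur, cont) =>
    let sections :=
      match cur with
      | some name =>
          if name ≠ "" ∧ cont ≠ [] then
            sections.insert name (PySem.Str.strip (PySem.Str.join "\n" cont))
          else sections
      | none => sections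
    (if sections.items.isEmpty then sections.insert "COMPLETE DOCUMENT" document else sections).items

-- ===== PORT B =====
def pyB_headers : List String :=
  ["EXECUTIVE SUMMARY:", "FACTS AND BACKGROUND:", "LEGAL ISSUES:",
   "ANALYSIS AND REASONING:", "CONCLUSIONS AND RECOMMENDATIONS:", "ADDITIONAL CONSIDERATIONS:"]

def pyB_isHeader (line : String) : Bool :=
  PySem.Str.endswith line ":" && pyB_headers.contains (PySem.Str.upper line)

-- _split_leading_body: the leading run of non-header lines and the remainder (takeWhile / dropWhile)
def pyB_go : List String → PySem.Dict String String → PySem.Dict String String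
  | [], sections => sections
  | h :: rest, sections =>
    let body := rest.takeWhile (fun l => !pyB_isHeader l)
    let rest' := rest.dropWhile (fun l => !pyB_isHeader l)
    let sections' :=
      if body.isEmpty then sections
      else sections.insert (PySem.Str.strip (PySem.Str.replace h ":" "")) (PySem.Str.join "\n" body)
    pyB_go rest' sections'
termination_by l => l.length
decreasing_by simpa using Nat.lt_succ_of_le (List.length_dropWhile_le _ _)

def parse_document_sections_py_alt (document : String) : List (String × String) :=
  let lines := (((PySem.Str.split? document "\n").getD []).map PySem.Str.strip).filter (fun l => l ≠ "")
  let sections := pyB_go (lines.dropWhile (fun l => !pyB_isHeader l)) (PySem.Dict.empty : PySem.Dict String String)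
  (if sections.items.isEmpty then sections.insert "COMPLETE DOCUMENT" document else sections).items

-- ===== PRECONDITION & SPEC =====
def Spec_parse_document_sections_py (document : String) (out : List (String × String)) : Prop := out = parse_document_sections_py_alt document
instance (document : String) (out : List (String × String)) : Decidable (Spec_parse_document_sections_py document out) := by unfold Spec_parse_document_sections_py; infer_instance

-- ===== CLAIM (what is proved, stated in full; the proofs are below) =====
def Claim_equal_parse_document_sections_py : Prop := ∀ (document : String), Dom_parse_document_sections_py document → Spec_parse_document_sections_py document (parse_document_sections_py document)

-- ===== LEMMAS AND PROOFS =====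

def pvKey (l : String) : String := PySem.Str.strip (PySem.Str.replace l ":" "")

theorem pyA_handle_eq (sections : PySem.Dict String String) (cur : Option String) (cont : List String) (line : String) :
    pyA_handle (sections, cur, cont) line =
      if pyB_isHeader line then
        (match cur with
         | some name =>
             if name ≠ "" ∧ cont ≠ [] then sections.insert name (PySem.Str.strip (PySem.Str.join "\n" cont))
             else sections
         | none => sections, some (pvKey line), [])
      else
        match cur with
        | some name => if name ≠ "" then (sections, cur, cont ++ [line]) else (sections, cur, cont)
        | none => (sections, cur, cont) := rfl

theorem pyA_handle_header (sections : PySem.Dict String String) (name : String)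
    (cont : List String) (line : String) (hl : pyB_isHeader line = true) :
    pyA_handle (sections, some name, cont) line =
      (if name ≠ "" ∧ cont ≠ [] then
         sections.insert name (PySem.Str.strip (PySem.Str.join "\n" cont))
       else sections, some (pvKey line), []) := by
  rw [pyA_handle_eq, if_pos hl]

theorem pv_fold_filter (raws : List String) (st : PySem.Dict String String × Option String × List String) :
    raws.foldl pyA_step st = ((raws.map PySem.Str.strip).filter (fun l => l ≠ "")).foldl pyA_handle st := by
  induction raws generalizing st with
  | nil => rfl
  | cons a t ih =>
    simp only [List.foldl_cons, List.map_cons, List.filter_cons, pyA_step]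
    by_cases h : PySem.Str.strip a = "" <;> simp [h, ih]

theorem pv_skip (pre : List String) (s : PySem.Dict String String)
    (h : ∀ l ∈ pre, pyB_isHeader l = false) :
    pre.foldl pyA_handle (s, none, ([] : List String)) = (s, none, []) := by
  induction pre with
  | nil => rfl
  | cons a t ih =>
    have ha := h a (by simp)
    simp only [List.foldl_cons, pyA_handle_eq, ha]
    exact ih (fun l hl => h l (by simp [hl]))

theorem pv_accum (body : List String) (s : PySem.Dict String String) (name : String) (cont : List String)
    (hname : name ≠ "") (h : ∀ l ∈ body, pyB_isHeader l = false) :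
    body.foldl pyA_handle (s, some name, cont) = (s, some name, cont ++ body) := by
  induction body generalizing cont with
  | nil => simp
  | cons a t ih =>
    have ha := h a (by simp)
    simp only [List.foldl_cons, pyA_handle_eq, ha, Bool.false_eq_true, if_false, hname,
      ne_eq, not_false_iff, if_true]
    rw [ih (cont ++ [a]) (fun l hl => h l (by simp [hl]))]
    simp

theorem pyB_go_nil (s : PySem.Dict String String) : pyB_go [] s = s := by rw [pyB_go]

theorem pyB_go_cons (h : String) (rest : List String) (s : PySem.Dict String String) :
    pyB_go (h :: rest) s =
      pyB_go (rest.dropWhile (fun l => !pyB_isHeader l))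
        (if (rest.takeWhile (fun l => !pyB_isHeader l)).isEmpty then s
         else s.insert (pvKey h) (PySem.Str.join "\n" (rest.takeWhile (fun l => !pyB_isHeader l)))) := by
  rw [pyB_go]; rfl

theorem pv_replace_go_colon (fuel : Nat) : ∀ (l acc : List Char), l.length ≤ fuel →
    PySem.Chars.replace.go [':'] [] fuel l acc = acc.reverse ++ l.filter (fun c => !(c == ':')) := by
  induction fuel with
  | zero =>
    intro l acc h
    have : l = [] := List.eq_nil_of_length_eq_zero (Nat.le_zero.mp h)
    subst this
    simp [PySem.Chars.replace.go]
  | succ n ih =>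
    intro l acc h
    cases l with
    | nil => simp [PySem.Chars.replace.go]
    | cons c t =>
      by_cases hc : c = ':'
      · subst hc
        have hp : List.isPrefixOf [':'] (':' :: t) = true := by simp [List.isPrefixOf]
        simp only [PySem.Chars.replace.go, hp, if_true, List.length_cons, List.length_nil,
          List.drop_succ_cons, List.drop_zero, List.reverse_nil, List.nil_append]
        rw [ih t acc (by simpa using Nat.le_of_succ_le_succ h)]
        simp
      · have hp : List.isPrefixOf [':'] (c :: t) = false := by
          simp [List.isPrefixOf]; exact fun e => hc e.symm
        simp only [PySem.Chars.replace.go, hp, Bool.false_eq_true, if_false]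
        rw [ih t (c :: acc) (by simpa using Nat.le_of_succ_le_succ h)]
        simp [hc]

theorem pv_replace_colon (l : List Char) :
    PySem.Chars.replace l [':'] [] = l.filter (fun c => !(c == ':')) := by
  simpa [PySem.Chars.replace] using pv_replace_go_colon l.length l [] le_rfl

theorem pv_isspace_iff (c : Char) : PySem.Chars.isspace c = true ↔
    (c.toNat = 32 ∨ (9 ≤ c.toNat ∧ c.toNat ≤ 13) ∨ (28 ≤ c.toNat ∧ c.toNat ≤ 31) ∨ c.toNat = 133 ∨
     c.toNat = 160 ∨ c.toNat = 5760 ∨ (8192 ≤ c.toNat ∧ c.toNat ≤ 8202) ∨ c.toNat = 8232 ∨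
     c.toNat = 8233 ∨ c.toNat = 8239 ∨ c.toNat = 8287 ∨ c.toNat = 12288) := by
  simp [PySem.Chars.isspace]
  tauto

theorem pv_islower_iff (c : Char) : PySem.Chars.islower c = true ↔ (97 ≤ c.toNat ∧ c.toNat ≤ 122) := by
  simp only [PySem.Chars.islower, Bool.and_eq_true, decide_eq_true_eq, Char.le_def,
    UInt32.le_iff_toNat_le]
  constructor
  · rintro ⟨h1, h2⟩
    exact ⟨h1, h2⟩
  · rintro ⟨h1, h2⟩
    exact ⟨h1, h2⟩

theorem pv_upperChar_letter {c h : Char} (h1 : 65 ≤ h.toNat) (h2 : h.toNat ≤ 90)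
    (he : PySem.Chars.upperChar c = h) : (c == ':') = false ∧ PySem.Chars.isspace c = false := by
  constructor
  · by_contra hc
    have hc' : c = ':' := by
      cases hbe : (c == ':') with
      | false => exact absurd hbe hc
      | true => exact beq_iff_eq.mp hbe
    subst hc'
    have : PySem.Chars.upperChar ':' = ':' := by decide
    rw [this] at he
    rw [← he] at h1
    simp [Char.toNat] at h1
  · by_contra hs
    have hs' : PySem.Chars.isspace c = true := by
      cases hbe : PySem.Chars.isspace c with
      | false => exact absurd hbe hs
      | true => rfl
    have hn := (pv_isspace_iff c).mp hs'
    have hl : PySem.Chars.islower c = false := by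
      cases hbe : PySem.Chars.islower c with
      | false => rfl
      | true =>
        have := (pv_islower_iff c).mp hbe
        omega
    have hcc : PySem.Chars.upperChar c = c := by
      simp [PySem.Chars.upperChar, hl]
    rw [hcc] at he
    subst he
    omega

theorem pv_dropWhile_head? {α : Type} {p : α → Bool} : ∀ {l : List α}, l.dropWhile p ≠ [] →
    ∃ c t, l.dropWhile p = c :: t ∧ p c = false := by
  intro l
  induction l with
  | nil => intro h; simp at h
  | cons a t ih =>
    intro h
    by_cases ha : p a
    · rw [List.dropWhile_cons_of_pos ha] at h ⊢
      exact ih h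
    · rw [List.dropWhile_cons_of_neg ha]
      exact ⟨a, t, rfl, Bool.eq_false_iff.mpr ha⟩

theorem pv_strip_ne_nil {z : List Char} {c : Char} (hc : c ∈ z)
    (hs : PySem.Chars.isspace c = false) : PySem.Chars.strip z ≠ [] := by
  intro h
  simp only [PySem.Chars.strip, PySem.Chars.rstrip, PySem.Chars.lstrip] at h
  rw [List.reverse_eq_nil_iff, List.dropWhile_eq_nil_iff] at h
  have h2 : ∀ x ∈ z.dropWhile PySem.Chars.isspace, PySem.Chars.isspace x = true :=
    fun x hx => h x (by simpa using hx)
  have h3 : PySem.Chars.isspace c = true := by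
    have := List.takeWhile_append_dropWhile (p := PySem.Chars.isspace) (l := z)
    rcases List.mem_append.mp (by rw [this]; exact hc) with hm | hm
    · exact List.mem_takeWhile_imp hm
    · exact h2 c hm
  rw [h3] at hs; exact Bool.true_eq_false ▸ hs.symm ▸ rfl

theorem pv_strip_head_last (ys : List Char) (h : PySem.Chars.strip ys ≠ []) :
    (∃ c, (PySem.Chars.strip ys).head? = some c ∧ PySem.Chars.isspace c = false) ∧
    (∃ c, (PySem.Chars.strip ys).getLast? = some c ∧ PySem.Chars.isspace c = false) := by
  have hdef : PySem.Chars.strip ys =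
      (List.dropWhile PySem.Chars.isspace (List.dropWhile PySem.Chars.isspace ys).reverse).reverse := rfl
  have hwne : List.dropWhile PySem.Chars.isspace (List.dropWhile PySem.Chars.isspace ys).reverse ≠ [] := by
    intro e; rw [hdef, e] at h; exact h rfl
  obtain ⟨c, t, hct, hcf⟩ := pv_dropWhile_head? hwne
  have hmne : List.dropWhile PySem.Chars.isspace ys ≠ [] := by
    intro e; rw [e] at hwne; simp at hwne
  obtain ⟨c0, t0, hct0, hcf0⟩ := pv_dropWhile_head? hmne
  constructor
  · have hpre : (List.dropWhile PySem.Chars.isspace (List.dropWhile PySem.Chars.isspace ys).reverse).reverse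
        <+: List.dropWhile PySem.Chars.isspace ys := by
      have hsuf := List.dropWhile_suffix (l := (List.dropWhile PySem.Chars.isspace ys).reverse)
        (p := PySem.Chars.isspace)
      have := List.reverse_prefix.mpr hsuf
      simpa using this
    obtain ⟨tail, htail⟩ := hpre
    refine ⟨c0, ?_, hcf0⟩
    rw [hdef]
    have hwr : (List.dropWhile PySem.Chars.isspace (List.dropWhile PySem.Chars.isspace ys).reverse).reverse ≠ [] := by
      simpa using hwne
    have hhd2 : ((List.dropWhile PySem.Chars.isspace (List.dropWhile PySem.Chars.isspace ys).reverse).reverse ++ tail).head? =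
        (List.dropWhile PySem.Chars.isspace (List.dropWhile PySem.Chars.isspace ys).reverse).reverse.head? := by
      cases hwr' : (List.dropWhile PySem.Chars.isspace (List.dropWhile PySem.Chars.isspace ys).reverse).reverse with
      | nil => exact absurd hwr' hwr
      | cons x xs => rfl
    calc (List.dropWhile PySem.Chars.isspace (List.dropWhile PySem.Chars.isspace ys).reverse).reverse.head?
        = ((List.dropWhile PySem.Chars.isspace (List.dropWhile PySem.Chars.isspace ys).reverse).reverse ++ tail).head? := hhd2.symm
      _ = (List.dropWhile PySem.Chars.isspace ys).head? := by rw [htail]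
      _ = some c0 := by rw [hct0]; rfl
  · refine ⟨c, ?_, hcf⟩
    rw [hdef, List.getLast?_reverse, hct]
    rfl

theorem pv_lstrip_id {J : List Char} {c : Char} (h : J.head? = some c)
    (hs : PySem.Chars.isspace c = false) : PySem.Chars.lstrip J = J := by
  cases J with
  | nil => rfl
  | cons a t =>
    have : a = c := by simpa using h
    subst this
    simp [PySem.Chars.lstrip, hs]

theorem pv_rstrip_id {J : List Char} {c : Char} (h : J.getLast? = some c)
    (hs : PySem.Chars.isspace c = false) : PySem.Chars.rstrip J = J := by
  have hr : J.reverse.head? = some c := by rw [List.head?_reverse]; exact h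
  cases hrv : J.reverse with
  | nil => rw [hrv] at hr; simp at hr
  | cons a t =>
    have : a = c := by rw [hrv] at hr; simpa using hr
    subst this
    have : PySem.Chars.rstrip J = (List.dropWhile PySem.Chars.isspace J.reverse).reverse := rfl
    rw [this, hrv, List.dropWhile_cons_of_neg (by simp [hs]), ← hrv, List.reverse_reverse]

theorem pv_join_getLast (sep : List Char) : ∀ parts : List (List Char), parts ≠ [] →
    (∀ p ∈ parts, ∃ c, p.getLast? = some c ∧ PySem.Chars.isspace c = false) →
    ∃ c, (PySem.Chars.join sep parts).getLast? = some c ∧ PySem.Chars.isspace c = false := by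
  intro parts
  induction parts with
  | nil => intro h; exact absurd rfl h
  | cons p ps ih =>
    intro _ h
    cases ps with
    | nil =>
      rw [PySem.Chars.join_singleton]
      exact h p (by simp)
    | cons b rest =>
      obtain ⟨c, hcl, hcs⟩ := ih (by simp) (fun q hq => h q (by simp [List.mem_cons] at hq ⊢; tauto))
      have hne : PySem.Chars.join sep (b :: rest) ≠ [] := by
        intro e; rw [e] at hcl; simp at hcl
      refine ⟨c, ?_, hcs⟩
      rw [PySem.Chars.join_cons_cons, List.getLast?_append_of_ne_nil _ hne, hcl]

theorem pv_join_head (sep : List Char) (p : List Char) (ps : List (List Char)) {c : Char}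
    (hp : p.head? = some c) : (PySem.Chars.join sep (p :: ps)).head? = some c := by
  cases ps with
  | nil => rw [PySem.Chars.join_singleton]; exact hp
  | cons b rest =>
    rw [PySem.Chars.join_cons_cons]
    cases p with
    | nil => simp at hp
    | cons a t => simpa using hp

theorem pv_strip_join (parts : List (List Char)) (hne : parts ≠ [])
    (h : ∀ p ∈ parts, (∃ c, p.head? = some c ∧ PySem.Chars.isspace c = false) ∧
         (∃ c, p.getLast? = some c ∧ PySem.Chars.isspace c = false)) :
    PySem.Chars.strip (PySem.Chars.join ['\n'] parts) = PySem.Chars.join ['\n'] parts := by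
  cases parts with
  | nil => exact absurd rfl hne
  | cons p ps =>
    obtain ⟨⟨c, hh, hhs⟩, _⟩ := h p (by simp)
    obtain ⟨c2, hl, hls⟩ := pv_join_getLast ['\n'] (p :: ps) (by simp) (fun q hq => (h q hq).2)
    have hhead := pv_join_head ['\n'] p ps hh
    show PySem.Chars.rstrip (PySem.Chars.lstrip (PySem.Chars.join ['\n'] (p :: ps))) = _
    rw [pv_lstrip_id hhead hhs, pv_rstrip_id hl hls]

theorem pv_strip_join_str (parts : List String) (hne : parts ≠ [])
    (h : ∀ p ∈ parts, (∃ y, p = PySem.Str.strip y) ∧ p ≠ "") :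
    PySem.Str.strip (PySem.Str.join "\n" parts) = PySem.Str.join "\n" parts := by
  apply String.toList_inj.mp
  rw [PySem.Str.toList_strip, PySem.Str.toList_join]
  have hsep : ("\n" : String).toList = ['\n'] := rfl
  rw [hsep]
  apply pv_strip_join
  · simpa using hne
  · intro p hp
    obtain ⟨q, hq, rfl⟩ := List.mem_map.mp hp
    obtain ⟨⟨y, hy⟩, hqne⟩ := h q hq
    have hql : q.toList ≠ [] := fun e => hqne (String.toList_eq_nil_iff.mp e)
    have : q.toList = PySem.Chars.strip y.toList := by rw [hy, PySem.Str.toList_strip]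
    rw [this] at hql ⊢
    exact pv_strip_head_last y.toList hql

theorem pv_key_toList (l : String) :
    (pvKey l).toList = PySem.Chars.strip (PySem.Chars.replace l.toList [':'] []) := by
  rw [pvKey, PySem.Str.toList_strip, PySem.Str.toList_replace]
  rfl

theorem pv_head_letter {h : String} {lit : String} {c0 : Char}
    (he : PySem.Str.upper h = lit) (hc0 : lit.toList.head? = some c0)
    (h1 : 65 ≤ c0.toNat) (h2 : c0.toNat ≤ 90) :
    ∃ c ∈ h.toList, (c == ':') = false ∧ PySem.Chars.isspace c = false := by
  have hmap : h.toList.map PySem.Chars.upperChar = lit.toList := by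
    have := PySem.Str.toList_upper h
    rw [he] at this
    exact this.symm ▸ rfl
  cases hl : h.toList with
  | nil => rw [hl] at hmap; rw [← hmap] at hc0; simp at hc0
  | cons a t =>
    rw [hl] at hmap
    have ha : PySem.Chars.upperChar a = c0 := by
      rw [← hmap] at hc0
      simpa using hc0
    exact ⟨a, List.mem_cons_self, pv_upperChar_letter (ha ▸ h1) (ha ▸ h2) ha⟩

theorem pv_key_ne (h : String) (hh : pyB_isHeader h = true) : pvKey h ≠ "" := by
  have hmem : PySem.Str.upper h ∈ pyB_headers := by
    rw [pyB_isHeader, Bool.and_eq_true] at hh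
    exact List.contains_iff_mem.mp hh.2
  -- extract a first character of h whose uppercase is an uppercase letter
  have hwit : ∃ c ∈ h.toList, (c == ':') = false ∧ PySem.Chars.isspace c = false := by
    simp only [pyB_headers, List.mem_cons, List.not_mem_nil, or_false] at hmem
    rcases hmem with he | he | he | he | he | he
    · exact pv_head_letter (c0 := 'E') he (by decide) (by decide) (by decide)
    · exact pv_head_letter (c0 := 'F') he (by decide) (by decide) (by decide)
    · exact pv_head_letter (c0 := 'L') he (by decide) (by decide) (by decide)
    · exact pv_head_letter (c0 := 'A') he (by decide) (by decide) (by decide)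
    · exact pv_head_letter (c0 := 'C') he (by decide) (by decide) (by decide)
    · exact pv_head_letter (c0 := 'A') he (by decide) (by decide) (by decide)
  obtain ⟨c, hcm, hcol, hsp⟩ := hwit
  intro he
  have hkl : PySem.Chars.strip (PySem.Chars.replace h.toList [':'] []) = [] := by
    rw [← pv_key_toList, he]; rfl
  have hcmem : c ∈ PySem.Chars.replace h.toList [':'] [] := by
    rw [pv_replace_colon]
    exact List.mem_filter.mpr ⟨hcm, by simp [hcol]⟩
  exact pv_strip_ne_nil hcmem hsp hkl

def pvFinish (st : PySem.Dict String String × Option String × List String) : PySem.Dict String String :=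
  match st with
  | (s, some name, cont) =>
      if name ≠ "" ∧ cont ≠ [] then s.insert name (PySem.Str.strip (PySem.Str.join "\n" cont)) else s
  | (s, none, _) => s

theorem pv_main (n : Nat) : ∀ (L : List String) (s : PySem.Dict String String) (h : String),
    L.length ≤ n → pyB_isHeader h = true →
    (∀ l ∈ L, (∃ y, l = PySem.Str.strip y) ∧ l ≠ "") →
    pvFinish (L.foldl pyA_handle (s, some (pvKey h), [])) = pyB_go (h :: L) s := by
  induction n with
  | zero =>
    intro L s h hlen hh _
    have : L = [] := List.eq_nil_of_length_eq_zero (Nat.le_zero.mp hlen)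
    subst this
    rw [pyB_go_cons]
    simp only [List.dropWhile_nil, List.takeWhile_nil, List.isEmpty_nil, pyB_go_nil]
    simp [pvFinish]
  | succ n ih =>
    intro L s h hlen hh hstrip
    have hL : L = L.takeWhile (fun l => !pyB_isHeader l) ++ L.dropWhile (fun l => !pyB_isHeader l) :=
      (List.takeWhile_append_dropWhile).symm
    have htake : ∀ l ∈ L.takeWhile (fun l => !pyB_isHeader l), pyB_isHeader l = false := by
      intro l hl
      have := List.mem_takeWhile_imp hl
      simpa using this
    have hbodymem : ∀ l ∈ L.takeWhile (fun l => !pyB_isHeader l), (∃ y, l = PySem.Str.strip y) ∧ l ≠ "" :=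
      fun l hl => hstrip l ((List.takeWhile_sublist _).subset hl)
    have hkey := pv_key_ne h hh
    conv_lhs => rw [hL]
    rw [List.foldl_append,
      pv_accum _ s (pvKey h) [] hkey htake, List.nil_append, pyB_go_cons]
    cases hd : L.dropWhile (fun l => !pyB_isHeader l) with
    | nil =>
      rw [List.foldl_nil, pyB_go_nil]
      by_cases hb : L.takeWhile (fun l => !pyB_isHeader l) = []
      · simp [pvFinish, hb]
      · have hjoin : PySem.Str.strip (PySem.Str.join "\n" (L.takeWhile (fun l => !pyB_isHeader l)))
            = PySem.Str.join "\n" (L.takeWhile (fun l => !pyB_isHeader l)) :=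
          pv_strip_join_str _ hb hbodymem
        simp [pvFinish, hb, hkey, hjoin, List.isEmpty_iff]
    | cons h' t =>
      have hh' : pyB_isHeader h' = true := by
        obtain ⟨c, t', hct, hcf⟩ := pv_dropWhile_head? (by rw [hd]; exact List.cons_ne_nil _ _)
        rw [hd] at hct
        cases hct
        simpa using hcf
      have hlen' : t.length ≤ n := by
        have : L.length = (L.takeWhile (fun l => !pyB_isHeader l)).length + (h' :: t).length := by
          conv_lhs => rw [hL, hd]
          rw [List.length_append]
        simp only [List.length_cons] at this
        omega
      have hstrip' : ∀ l ∈ t, (∃ y, l = PySem.Str.strip y) ∧ l ≠ "" := by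
        intro l hl
        apply hstrip
        have : l ∈ L.dropWhile (fun l => !pyB_isHeader l) := by rw [hd]; exact List.mem_cons_of_mem _ hl
        exact (List.dropWhile_sublist _).subset this
      rw [List.foldl_cons, pyA_handle_header _ _ _ _ hh']
      have hs2 : (if pvKey h ≠ "" ∧ L.takeWhile (fun l => !pyB_isHeader l) ≠ [] then
            s.insert (pvKey h) (PySem.Str.strip (PySem.Str.join "\n" (L.takeWhile (fun l => !pyB_isHeader l))))
          else s)
          = (if (L.takeWhile (fun l => !pyB_isHeader l)).isEmpty = true then s
             else s.insert (pvKey h) (PySem.Str.join "\n" (L.takeWhile (fun l => !pyB_isHeader l)))) := by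
        by_cases hb : L.takeWhile (fun l => !pyB_isHeader l) = []
        · simp [hb]
        · have hjoin : PySem.Str.strip (PySem.Str.join "\n" (L.takeWhile (fun l => !pyB_isHeader l)))
              = PySem.Str.join "\n" (L.takeWhile (fun l => !pyB_isHeader l)) :=
            pv_strip_join_str _ hb hbodymem
          simp [hb, hkey, hjoin, List.isEmpty_iff]
      rw [hs2]
      exact ih t _ h' hlen' hh' hstrip'

theorem pyA_handle_none (sections : PySem.Dict String String) (cont : List String) (line : String)
    (hl : pyB_isHeader line = true) :
    pyA_handle (sections, none, cont) line = (sections, some (pvKey line), []) := by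
  rw [pyA_handle_eq, if_pos hl]

theorem pv_equal (document : String) :
    parse_document_sections_py document = parse_document_sections_py_alt document := by
  simp only [parse_document_sections_py, parse_document_sections_py_alt]
  rw [pv_fold_filter]
  have hLmem : ∀ l ∈ (((PySem.Str.split? document "\n").getD []).map PySem.Str.strip).filter
      (fun l => l ≠ ""), (∃ y, l = PySem.Str.strip y) ∧ l ≠ "" := by
    intro l hl
    obtain ⟨hm, hne⟩ := List.mem_filter.mp hl
    obtain ⟨y, _, rfl⟩ := List.mem_map.mp hm
    exact ⟨⟨y, rfl⟩, of_decide_eq_true hne⟩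
  cases hd : ((((PySem.Str.split? document "\n").getD []).map PySem.Str.strip).filter
      (fun l => l ≠ "")).dropWhile (fun l => !pyB_isHeader l) with
  | nil =>
    have hall : ∀ l ∈ (((PySem.Str.split? document "\n").getD []).map PySem.Str.strip).filter
        (fun l => l ≠ ""), pyB_isHeader l = false := by
      intro l hl
      have := List.dropWhile_eq_nil_iff.mp hd l hl
      simpa using this
    rw [pv_skip _ _ hall, pyB_go_nil]
  | cons h t =>
    have hh : pyB_isHeader h = true := by
      obtain ⟨c, t', hct, hcf⟩ := pv_dropWhile_head? (by rw [hd]; exact List.cons_ne_nil _ _)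
      rw [hd] at hct
      cases hct
      simpa using hcf
    have hL : (((PySem.Str.split? document "\n").getD []).map PySem.Str.strip).filter
        (fun l => l ≠ "") = ((((PySem.Str.split? document "\n").getD []).map PySem.Str.strip).filter
        (fun l => l ≠ "")).takeWhile (fun l => !pyB_isHeader l) ++ (h :: t) := by
      conv_lhs => rw [← List.takeWhile_append_dropWhile
        (p := fun l => !pyB_isHeader l)
        (l := (((PySem.Str.split? document "\n").getD []).map PySem.Str.strip).filter (fun l => l ≠ ""))]
      rw [hd]
    have htake : ∀ l ∈ ((((PySem.Str.split? document "\n").getD []).map PySem.Str.strip).filter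
        (fun l => l ≠ "")).takeWhile (fun l => !pyB_isHeader l), pyB_isHeader l = false := by
      intro l hl
      have := List.mem_takeWhile_imp hl
      simpa using this
    have hmem' : ∀ l ∈ t, (∃ y, l = PySem.Str.strip y) ∧ l ≠ "" := by
      intro l hl
      apply hLmem
      apply (List.dropWhile_sublist _).subset
      rw [hd]
      exact List.mem_cons_of_mem _ hl
    conv_lhs => rw [hL]
    rw [List.foldl_append, pv_skip _ _ htake, List.foldl_cons, pyA_handle_none _ _ _ hh]
    have hmain := pv_main t.length t PySem.Dict.empty h le_rfl hh hmem'
    rcases hst : t.foldl pyA_handle (PySem.Dict.empty, some (pvKey h), []) with ⟨s2, cur2, cont2⟩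
    rw [hst] at hmain
    rw [← hmain]
    cases cur2 <;> rfl

-- ===== VERDICT (by name: the statement is the Claim_ definition above) =====
theorem parse_document_sections_py_spec : Claim_equal_parse_document_sections_py := by
  intro document _
  show parse_document_sections_py document = parse_document_sections_py_alt document
  exact pv_equal document
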